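-- pv_equiv track=rewrite | github.com/m1sterzer0/DaveProgrammingCompetitions | hackercup/python/2016/qual_B.py | solve
-- ===== SOURCE A (Python) =====
-- def solve(N,G1,G2) :
--     st = 'X'; single1 = set(); multi1 = []
--     for (i,c) in enumerate("X" + G1 + "X") :
--         if st == 'X' and c == '.' :
--             b = i; st = '.'
--         elif st == '.' and c == 'X' :
--             e = i-1
--             if b==e : single1.add(b)
--             else : multi1.append((b,e))
--             st = 'X'
--     st = 'X'; single2 = set(); multi2 = []
--     for (i,c) in enumerate("X" + G2 + "X") :
--         if st == 'X' and c == '.' :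
--             b = i; st = '.'
--         elif st == '.' and c == 'X' :
--             e = i-1
--             if b==e : single2.add(b)
--             else : multi2.append((b,e))
--             st = 'X'
--     ans = len(single1) + len(single2) + len(multi1) + len(multi2)
--     for (b,e) in multi1 :
--         for i in range(b,e+1) :
--             if i in single2 : ans -= 1; break
--     for (b,e) in multi2 :
--         for i in range(b,e+1) :
--             if i in single1 : ans -= 1; break
--     doublesingle = single1.intersection(single2)
--     ans -= len(doublesingle)
--     return ans
-- ===== SOURCE B (Python) =====
-- def solve(N, G1, G2):
--     # Different decomposition/data structure: extract runs by index-jumping over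
--     # the padded row (no per-character state machine), record a column -> run-id
--     # map for multi-runs, then invert the overlap test: iterate over the OTHER
--     # row's single positions and collect killed run ids in a set.
--     def label(G):
--         row = "X" + G + "X"
--         singles = set(); runof = {}; nmulti = 0
--         i = 0; n = len(row)
--         while i < n:
--             if row[i] != '.':
--                 i += 1
--             else:
--                 b = i
--                 j = i
--                 while row[j] != 'X':
--                     j += 1
--                 e = j - 1
--                 if b == e:
--                     singles.add(b)
--                 else:
--                     for k in range(b, e + 1):
--                         runof[k] = nmulti
--                     nmulti += 1
--                 i = j + 1
--         return singles, runof, nmulti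
--     s1, r1, m1 = label(G1)
--     s2, r2, m2 = label(G2)
--     killed1 = {r1[p] for p in s2 if p in r1}
--     killed2 = {r2[p] for p in s1 if p in r2}
--     return len(s1) + len(s2) + m1 + m2 - len(killed1) - len(killed2) - len(s1 & s2)
-- ===== Notes on version B (the rewrite author's own statement) =====
-- stated objective: alternative
-- what changed: B extracts runs by index-jumping over the padded row (no per-character state machine), builds a column-to-run-id dict for multi-runs, and inverts the overlap test: it iterates over the other row's single positions, looks each up in the run-id dict and collects killed run ids in a set, instead of A's nested rescan of every multi-run's cells against the single set.
import Mathlib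
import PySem

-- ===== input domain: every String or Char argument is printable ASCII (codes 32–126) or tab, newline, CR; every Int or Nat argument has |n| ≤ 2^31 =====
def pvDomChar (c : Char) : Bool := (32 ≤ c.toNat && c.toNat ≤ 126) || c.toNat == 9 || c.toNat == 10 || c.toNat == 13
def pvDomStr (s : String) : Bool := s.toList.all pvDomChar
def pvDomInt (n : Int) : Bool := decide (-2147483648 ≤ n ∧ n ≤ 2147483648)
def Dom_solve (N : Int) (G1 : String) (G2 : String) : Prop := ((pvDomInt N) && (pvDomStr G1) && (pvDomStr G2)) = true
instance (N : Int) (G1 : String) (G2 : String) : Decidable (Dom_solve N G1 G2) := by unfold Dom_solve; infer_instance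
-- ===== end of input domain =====

-- B extracts runs by index-jumping (no per-character state machine), keeps a
-- column->run-id dict and inverts the overlap test over the other row's single
-- positions, collecting killed run ids in a set; objective: alternative.

-- ===== PORT A =====
-- A's per-character state machine; state: (st, b, single, multi)
def solveStepA (s : Char × Int × PySem.Set Int × List (Int × Int)) (ic : Int × Char) :
    Char × Int × PySem.Set Int × List (Int × Int) :=
  if s.1 = 'X' ∧ ic.2 = '.' then ('.', ic.1, s.2.2.1, s.2.2.2)
  else if s.1 = '.' ∧ ic.2 = 'X' then
    if s.2.1 = ic.1 - 1 then ('X', s.2.1, PySem.Set.add s.2.2.1 s.2.1, s.2.2.2)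
    else ('X', s.2.1, s.2.2.1, s.2.2.2 ++ [(s.2.1, ic.1 - 1)])
  else s

def solve (N : Int) (G1 : String) (G2 : String) : Int :=
  let r1 := (PySem.List.enumerate ('X' :: G1.toList ++ ['X']) 0).foldl solveStepA
      ('X', 0, PySem.Set.empty, ([] : List (Int × Int)))
  let single1 := r1.2.2.1
  let multi1 := r1.2.2.2
  let r2 := (PySem.List.enumerate ('X' :: G2.toList ++ ['X']) 0).foldl solveStepA
      ('X', 0, PySem.Set.empty, ([] : List (Int × Int)))
  let single2 := r2.2.2.1
  let multi2 := r2.2.2.2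
  let ans : Int := (PySem.Set.len single1 : Int) + (PySem.Set.len single2 : Int)
      + (multi1.length : Int) + (multi2.length : Int)
  -- 'for i in range(b,e+1): if i in single2: ans -= 1; break' = subtract 1 iff some i in the range is in single2
  let ans := multi1.foldl (fun a p =>
      if (PySem.List.pyRange p.1 (p.2 + 1) 1).any (fun i => PySem.Set.contains single2 i) then a - 1 else a) ans
  let ans := multi2.foldl (fun a p =>
      if (PySem.List.pyRange p.1 (p.2 + 1) 1).any (fun i => PySem.Set.contains single1 i) then a - 1 else a) ans
  ans - (PySem.Set.len (PySem.Set.inter single1 single2) : Int)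

-- ===== PORT B =====
-- inner 'while row[j] != 'X': j += 1' — number of steps taken from the run start
def runLenB : List Char → Nat
  | [] => 0
  | c :: rest => if c = 'X' then 0 else runLenB rest + 1

-- outer 'while i < n' loop of B's label(): index-jumping over the list suffix
def labelGo (cs : List Char) (i : Int) (singles : PySem.Set Int)
    (runof : PySem.Dict Int Int) (nm : Int) : PySem.Set Int × PySem.Dict Int Int × Int :=
  match cs with
  | [] => (singles, runof, nm)
  | c :: rest =>
    if c ≠ '.' then labelGo rest (i + 1) singles runof nm
    else
      let L := runLenB (c :: rest)      -- j - i; 'i = j + 1' = drop L+1 of (c :: rest)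
      let b := i
      let e := i + (L : Int) - 1
      if b = e then labelGo (rest.drop L) (i + L + 1) (PySem.Set.add singles b) runof nm
      else labelGo (rest.drop L) (i + L + 1) singles
          ((PySem.List.pyRange b (e + 1) 1).foldl (fun d k => PySem.Dict.insert d k nm) runof) (nm + 1)
  termination_by cs.length

def labelB (G : String) : PySem.Set Int × PySem.Dict Int Int × Int :=
  labelGo ('X' :: G.toList ++ ['X']) 0 PySem.Set.empty PySem.Dict.empty 0

-- killed = {r[p] for p in s if p in r}
def killedB (s : PySem.Set Int) (r : PySem.Dict Int Int) : PySem.Set Int :=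
  s.foldl (fun ks p =>
    match PySem.Dict.get? r p with
    | some j => PySem.Set.add ks j
    | none => ks) PySem.Set.empty

def solve_alt (N : Int) (G1 : String) (G2 : String) : Int :=
  let l1 := labelB G1
  let s1 := l1.1
  let r1 := l1.2.1
  let m1 := l1.2.2
  let l2 := labelB G2
  let s2 := l2.1
  let r2 := l2.2.1
  let m2 := l2.2.2
  let killed1 := killedB s2 r1
  let killed2 := killedB s1 r2
  (PySem.Set.len s1 : Int) + (PySem.Set.len s2 : Int) + m1 + m2
    - (PySem.Set.len killed1 : Int) - (PySem.Set.len killed2 : Int)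
    - (PySem.Set.len (PySem.Set.inter s1 s2) : Int)

-- ===== PRECONDITION & SPEC =====
def Spec_solve (N : Int) (G1 : String) (G2 : String) (out : Int) : Prop := out = solve_alt N G1 G2
instance (N : Int) (G1 : String) (G2 : String) (out : Int) : Decidable (Spec_solve N G1 G2 out) := by unfold Spec_solve; infer_instance

-- ===== CLAIM (what is proved, stated in full; the proofs are below) =====
def Claim_equal_solve : Prop := ∀ (N : Int) (G1 : String) (G2 : String), Dom_solve N G1 G2 → Spec_solve N G1 G2 (solve N G1 G2)

-- ===== LEMMAS AND PROOFS =====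

-- the predicate "this run's span contains a member of S" (A's inner loop with break)
def killP (S : PySem.Set Int) (p : Int × Int) : Bool :=
  (PySem.List.pyRange p.1 (p.2 + 1) 1).any (fun i => PySem.Set.contains S i)

def RunHit (m : List (Int × Int)) (p j : Int) : Prop :=
  ∃ (jn : Nat) (_ : jn < m.length), j = (jn : Int) ∧ m[jn].1 ≤ p ∧ p ≤ m[jn].2

lemma runLenB_le (cs : List Char) : runLenB cs ≤ cs.length := by
  induction cs with
  | nil => simp [runLenB]
  | cons c rest ih => simp only [runLenB]; split <;> simp <;> omega

lemma runLenB_take_ne (cs : List Char) : ∀ c ∈ cs.take (runLenB cs), c ≠ 'X' := by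
  induction cs with
  | nil => simp
  | cons c rest ih =>
    simp only [runLenB]
    split
    · simp
    · next h => intro c' hc'; simp [List.take_succ_cons] at hc'
                rcases hc' with h' | h'
                · simpa [h'] using h
                · exact ih c' h'

lemma runLenB_getElem (cs : List Char) (h : runLenB cs < cs.length) :
    cs[runLenB cs]'h = 'X' := by
  induction cs with
  | nil => simp at h
  | cons c rest ih =>
    by_cases hc : c = 'X'
    · simp [runLenB, hc]
    · have : runLenB (c :: rest) = runLenB rest + 1 := by simp [runLenB, hc]
      simp only [this] at h ⊢
      simpa using ih (by simpa using h)

lemma runLenB_lt (cs : List Char) (h : cs.getLast? = some 'X') :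
    runLenB cs < cs.length := by
  rcases Nat.lt_or_ge (runLenB cs) cs.length with h' | h'
  · exact h'
  · exfalso
    have heq : runLenB cs = cs.length := le_antisymm (runLenB_le cs) h'
    have hmem : 'X' ∈ cs := List.mem_of_getLast? h
    have := runLenB_take_ne cs 'X' (by simpa [heq] using hmem)
    exact this rfl

lemma foldA_skip (ds : List Char) (h : ∀ c ∈ ds, c ≠ 'X') :
    ∀ (i b : Int) (s : PySem.Set Int) (m : List (Int × Int)),
      (PySem.List.enumerate ds i).foldl solveStepA ('.', b, s, m) = ('.', b, s, m) := by
  induction ds with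
  | nil => intro i b s m; simp [PySem.List.enumerate_nil]
  | cons c rest ih =>
    intro i b s m
    have hc : c ≠ 'X' := h c (by simp)
    rw [PySem.List.enumerate_cons, List.foldl_cons]
    have hstep : solveStepA ('.', b, s, m) (i, c) = ('.', b, s, m) := by
      simp [solveStepA, hc]
    rw [hstep]
    exact ih (fun c' hc' => h c' (by simp [hc'])) _ _ _ _

lemma get?_range_insert (v : Int) :
    ∀ (n : Nat) (a b : Int), (b - a).toNat = n →
    ∀ (d : PySem.Dict Int Int) (p : Int),
      ((PySem.List.pyRange a b 1).foldl (fun d k => PySem.Dict.insert d k v) d).get? p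
        = if a ≤ p ∧ p < b then some v else d.get? p := by
  intro n
  induction n with
  | zero =>
    intro a b hn d p
    have : PySem.List.pyRange a b 1 = [] := by simp [PySem.List.pyRange]; omega
    rw [this]
    simp only [List.foldl_nil]
    split
    · omega
    · rfl
  | succ n ih =>
    intro a b hn d p
    have hab : a < b := by omega
    rw [PySem.List.pyRange_one_cons hab, List.foldl_cons]
    rw [ih (a + 1) b (by omega) _ p]
    rw [PySem.Dict.get?_insert]
    by_cases hpa : p = a
    · subst hpa; simp; omega
    · split <;> split <;> simp_all <;> omega

lemma closed_tail {c : Char} {rest : List Char}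
    (h : (c :: rest).getLast? = some 'X') : rest = [] ∨ rest.getLast? = some 'X' := by
  cases rest with
  | nil => exact Or.inl rfl
  | cons r rs => right; rwa [List.getLast?_cons_cons] at h

lemma runHit_append (m : List (Int × Int)) (b e p j : Int) :
    RunHit (m ++ [(b, e)]) p j ↔ RunHit m p j ∨ (j = (m.length : Int) ∧ b ≤ p ∧ p ≤ e) := by
  constructor
  · rintro ⟨jn, hjl, hj, h1, h2⟩
    rcases Nat.lt_or_ge jn m.length with h | h
    · left
      exact ⟨jn, h, hj, by rwa [List.getElem_append_left h] at h1,
        by rwa [List.getElem_append_left h] at h2⟩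
    · right
      have hjn : jn = m.length := by simp at hjl; omega
      subst hjn
      simp only [List.getElem_concat_length] at h1 h2
      exact ⟨hj, h1, h2⟩
  · rintro (⟨jn, hjl, hj, h1, h2⟩ | ⟨hj, h1, h2⟩)
    · refine ⟨jn, by simp; omega, hj, ?_, ?_⟩
      · rw [List.getElem_append_left hjl]; exact h1
      · rw [List.getElem_append_left hjl]; exact h2
    · refine ⟨m.length, by simp, hj, ?_, ?_⟩
      · simp only [List.getElem_concat_length]; exact h1
      · simp only [List.getElem_concat_length]; exact h2

lemma labelGo_spec :
    ∀ (n : Nat) (cs : List Char), cs.length = n →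
    ∀ (i b0 : Int) (s : PySem.Set Int) (m : List (Int × Int)) (d : PySem.Dict Int Int),
    (cs = [] ∨ cs.getLast? = some 'X') →
    (∀ q ∈ m, q.2 < i) →
    (∀ p j : Int, d.get? p = some j ↔ RunHit m p j) →
    ∃ d' : PySem.Dict Int Int,
      labelGo cs i s d (m.length : Int)
        = (((PySem.List.enumerate cs i).foldl solveStepA ('X', b0, s, m)).2.2.1, d',
           ((((PySem.List.enumerate cs i).foldl solveStepA ('X', b0, s, m)).2.2.2).length : Int))
      ∧ (∀ p j : Int, d'.get? p = some j ↔
           RunHit (((PySem.List.enumerate cs i).foldl solveStepA ('X', b0, s, m)).2.2.2) p j) := by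
  intro n
  induction n using Nat.strong_induction_on with
  | _ n ih =>
    intro cs hn i b0 s m d hcl hord hinv
    cases cs with
    | nil =>
      exact ⟨d, by simp [labelGo, PySem.List.enumerate_nil], by
        simpa [PySem.List.enumerate_nil] using hinv⟩
    | cons c rest =>
      have hlast : (c :: rest).getLast? = some 'X' := by
        rcases hcl with h | h
        · exact absurd h (by simp)
        · exact h
      by_cases hc : c = '.'
      · subst hc
        have hL1 : runLenB ('.' :: rest) = runLenB rest + 1 := by simp [runLenB]
        set L := runLenB ('.' :: rest) with hLdef
        have hlt : L < ('.' :: rest).length := runLenB_lt _ hlast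
        have hX : ('.' :: rest)[L]'hlt = 'X' := runLenB_getElem _ hlt
        have hsplit : '.' :: rest
            = ('.' :: rest).take L ++ 'X' :: ('.' :: rest).drop (L + 1) := by
          conv_lhs => rw [← List.take_append_drop L ('.' :: rest)]
          rw [List.drop_eq_getElem_cons hlt, hX]
        have htakelen : (('.' :: rest).take L).length = L :=
          List.length_take_of_le (le_of_lt hlt)
        have htake : (PySem.List.enumerate (('.' :: rest).take L) i).foldl solveStepA
            ('X', b0, s, m) = ('.', i, s, m) := by
          have ht : ('.' :: rest).take L = '.' :: rest.take (runLenB rest) := by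
            rw [hL1, List.take_succ_cons]
          rw [ht, PySem.List.enumerate_cons, List.foldl_cons]
          have hopen : solveStepA ('X', b0, s, m) (i, '.') = ('.', i, s, m) := by
            simp [solveStepA]
          rw [hopen]
          exact foldA_skip _ (runLenB_take_ne rest) _ _ _ _
        have hfold : (PySem.List.enumerate ('.' :: rest) i).foldl solveStepA ('X', b0, s, m)
            = (PySem.List.enumerate (rest.drop L) (i + (L : Int) + 1)).foldl solveStepA
                (solveStepA ('.', i, s, m) (i + (L : Int), 'X')) := by
          conv_lhs => rw [hsplit]
          rw [PySem.List.enumerate_append, List.foldl_append, htake, htakelen,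
            PySem.List.enumerate_cons, List.foldl_cons, List.drop_succ_cons]
        have hdropcl : rest.drop L = [] ∨ (rest.drop L).getLast? = some 'X' := by
          rcases Nat.lt_or_ge L rest.length with hr | hr
          · right
            rw [List.getLast?_drop, if_neg (by omega)]
            have hne : rest ≠ [] := by intro h; subst h; simp at hr
            cases rest with
            | nil => simp at hr
            | cons r rs => rwa [List.getLast?_cons_cons] at hlast
          · left; exact List.drop_eq_nil_of_le hr
        have hdlen : (rest.drop L).length < n := by
          rw [List.length_drop]
          simp only [List.length_cons] at hn
          omega
        have hLpos : 1 ≤ L := by omega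
        by_cases hone : i = i + (L : Int) - 1
        · -- single run
          have hXstep : solveStepA ('.', i, s, m) (i + (L : Int), 'X')
              = ('X', i, PySem.Set.add s i, m) := by
            simp only [solveStepA]
            rw [if_neg (by simp), if_pos (by simp), if_pos (by omega)]
          have hB : labelGo ('.' :: rest) i s d (m.length : Int)
              = labelGo (rest.drop L) (i + L + 1) (PySem.Set.add s i) d (m.length : Int) := by
            rw [labelGo]
            simp only [← hLdef]
            rw [if_neg (by simp), if_pos hone]
          rw [hB, hfold, hXstep]
          refine ih _ hdlen _ rfl (i + L + 1) i (PySem.Set.add s i) m d hdropcl ?_ hinv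
          intro q hq
          have h1 := hord q hq
          have h2 : (0 : Int) ≤ (L : Int) := Int.natCast_nonneg L
          omega
        · -- multi run
          have hXstep : solveStepA ('.', i, s, m) (i + (L : Int), 'X')
              = ('X', i, s, m ++ [(i, i + (L : Int) - 1)]) := by
            simp only [solveStepA]
            rw [if_neg (by simp), if_pos (by simp), if_neg (by omega)]
          have hB : labelGo ('.' :: rest) i s d (m.length : Int)
              = labelGo (rest.drop L) (i + L + 1) s
                  ((PySem.List.pyRange i (i + (L : Int) - 1 + 1) 1).foldl
                    (fun d k => PySem.Dict.insert d k (m.length : Int)) d)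
                  ((m.length : Int) + 1) := by
            rw [labelGo]
            simp only [← hLdef]
            rw [if_neg (by simp), if_neg hone]
          have hbound : i + (L : Int) - 1 + 1 = i + (L : Int) := by ring
          have hd2get : ∀ p : Int,
              ((PySem.List.pyRange i (i + (L : Int) - 1 + 1) 1).foldl
                (fun d k => PySem.Dict.insert d k (m.length : Int)) d).get? p
              = if i ≤ p ∧ p < i + (L : Int) then some (m.length : Int) else d.get? p := by
            intro p
            rw [hbound, get?_range_insert (m.length : Int) L i (i + (L : Int)) (by omega) d p]
          have hinv' : ∀ p j : Int,
              ((PySem.List.pyRange i (i + (L : Int) - 1 + 1) 1).foldl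
                (fun d k => PySem.Dict.insert d k (m.length : Int)) d).get? p = some j
              ↔ RunHit (m ++ [(i, i + (L : Int) - 1)]) p j := by
            intro p j
            rw [hd2get p, runHit_append]
            by_cases hin : i ≤ p ∧ p < i + (L : Int)
            · rw [if_pos hin]
              constructor
              · intro h
                exact Or.inr ⟨(Option.some_inj.mp h).symm, hin.1, by omega⟩
              · rintro (⟨jn, hjl, hj, h1, h2⟩ | ⟨hj, h1, h2⟩)
                · exfalso
                  have := hord (m[jn]) (List.getElem_mem _)
                  omega
                · rw [hj]
            · rw [if_neg hin, hinv p j]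
              constructor
              · exact Or.inl
              · rintro (hr | ⟨hj, h1, h2⟩)
                · exact hr
                · exact absurd ⟨h1, by omega⟩ hin
          have hord' : ∀ q ∈ m ++ [(i, i + (L : Int) - 1)], q.2 < i + (L : Int) + 1 := by
            intro q hq
            rcases List.mem_append.mp hq with hq | hq
            · have h1 := hord q hq
              have h2 : (0 : Int) ≤ (L : Int) := Int.natCast_nonneg L
              omega
            · rw [List.mem_singleton] at hq
              subst hq
              dsimp only
              omega
          rw [hB, hfold, hXstep]
          have hres := ih _ hdlen _ rfl (i + L + 1) i s (m ++ [(i, i + (L : Int) - 1)])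
            ((PySem.List.pyRange i (i + (L : Int) - 1 + 1) 1).foldl
              (fun d k => PySem.Dict.insert d k (m.length : Int)) d)
            hdropcl hord' hinv'
          have hcast : (((m ++ [(i, i + (L : Int) - 1)]).length : Nat) : Int)
              = (m.length : Int) + 1 := by simp
          rw [hcast] at hres
          exact hres
      · -- c is neither '.' (outer else): A skips it in state 'X', B advances the index
        have hstep : solveStepA ('X', b0, s, m) (i, c) = ('X', b0, s, m) := by
          simp [solveStepA, hc]
        have hB : labelGo (c :: rest) i s d (m.length : Int)
            = labelGo rest (i + 1) s d (m.length : Int) := by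
          rw [labelGo]
          rw [if_pos hc]
        rw [hB, PySem.List.enumerate_cons, List.foldl_cons, hstep]
        exact ih rest.length (by simp only [List.length_cons] at hn; omega) rest rfl
          (i + 1) b0 s m d (closed_tail hlast)
          (fun q hq => by have := hord q hq; omega) hinv

def killIdx (S : PySem.Set Int) (l : List ((Int × Int) × Nat)) : List Int :=
  l.filterMap (fun qj => if killP S qj.1 then some ((qj.2 : Int)) else none)

lemma killed_aux (d : PySem.Dict Int Int) :
    ∀ (l : List Int) (S0 : PySem.Set Int),
      l.foldl (fun ks p => match PySem.Dict.get? d p with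
        | some j => PySem.Set.add ks j | none => ks) S0
      = (l.filterMap (fun p => PySem.Dict.get? d p)).foldl PySem.Set.add S0 := by
  intro l
  induction l with
  | nil => simp
  | cons p l ih =>
    intro S0
    rw [List.foldl_cons, List.filterMap_cons]
    cases h : PySem.Dict.get? d p with
    | none => simp [ih]
    | some j => simp [ih]

lemma killedB_eq_ofList (d : PySem.Dict Int Int) (s : PySem.Set Int) :
    killedB s d = PySem.Set.ofList (s.filterMap (fun p => PySem.Dict.get? d p)) := by
  rw [killedB, killed_aux, PySem.Set.ofList_eq_foldl]; rfl

lemma killIdx_length (S : PySem.Set Int) :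
    ∀ (l : List (Int × Int)) (k : Nat),
      (killIdx S (l.zipIdx k)).length = l.countP (killP S) := by
  intro l
  induction l with
  | nil => simp [killIdx]
  | cons q l ih =>
    intro k
    rw [List.zipIdx_cons, killIdx, List.filterMap_cons, List.countP_cons]
    by_cases h : killP S q = true <;> simp [h, killIdx] at ih ⊢ <;> rw [ih]

lemma killIdx_mem (S : PySem.Set Int) :
    ∀ (l : List (Int × Int)) (k : Nat) (j : Int),
      j ∈ killIdx S (l.zipIdx k) ↔
        ∃ (jn : Nat) (_ : jn < l.length), j = ((k + jn : Nat) : Int) ∧ killP S l[jn] = true := by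
  intro l
  induction l with
  | nil => simp [killIdx]
  | cons q l ih =>
    intro k j
    rw [List.zipIdx_cons, killIdx, List.filterMap_cons]
    constructor
    · intro hmem
      by_cases h : killP S q = true
      · simp only [h, if_pos] at hmem
        rcases List.mem_cons.mp hmem with h' | h'
        · exact ⟨0, by simp, by simpa using h', by simpa using h⟩
        · rcases (ih (k+1) j).mp h' with ⟨jn, hlt, hj, hk⟩
          exact ⟨jn + 1, by simpa using hlt, by push_cast at hj ⊢; omega, by simpa using hk⟩
      · simp only [h, if_neg, Bool.false_eq_true, not_false_iff] at hmem
        rcases (ih (k+1) j).mp hmem with ⟨jn, hlt, hj, hk⟩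
        exact ⟨jn + 1, by simpa using hlt, by push_cast at hj ⊢; omega, by simpa using hk⟩
    · rintro ⟨jn, hlt, hj, hk⟩
      cases jn with
      | zero =>
        simp only [List.getElem_cons_zero] at hk
        simp [hk]
        left; omega
      | succ jn =>
        have : j ∈ killIdx S (l.zipIdx (k+1)) :=
          (ih (k+1) j).mpr ⟨jn, by simpa using hlt, by push_cast at hj ⊢; omega, by simpa using hk⟩
        by_cases h : killP S q = true <;> simp [h, killIdx] at this ⊢ <;> tauto

lemma killIdx_ge (S : PySem.Set Int) (l : List (Int × Int)) (k : Nat) (j : Int)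
    (h : j ∈ killIdx S (l.zipIdx k)) : (k : Int) ≤ j := by
  rcases (killIdx_mem S l k j).mp h with ⟨jn, _, hj, _⟩
  omega

lemma killIdx_nodup (S : PySem.Set Int) :
    ∀ (l : List (Int × Int)) (k : Nat), (killIdx S (l.zipIdx k)).Nodup := by
  intro l
  induction l with
  | nil => simp [killIdx]
  | cons q l ih =>
    intro k
    rw [List.zipIdx_cons, killIdx, List.filterMap_cons]
    by_cases h : killP S q = true
    · simp only [h, if_pos]
      refine List.nodup_cons.mpr ⟨fun hmem => ?_, by simpa [killIdx] using ih (k+1)⟩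
      have := killIdx_ge S l (k+1) _ hmem
      omega
    · simpa [h, killIdx] using ih (k+1)

lemma killP_iff (S : PySem.Set Int) (q : Int × Int) :
    killP S q = true ↔ ∃ p ∈ S, q.1 ≤ p ∧ p ≤ q.2 := by
  rw [killP, List.any_eq_true]
  constructor
  · rintro ⟨p, hp, hc⟩
    rw [PySem.List.mem_pyRange_one] at hp
    exact ⟨p, (PySem.Set.contains_iff S p).mp hc, hp.1, by omega⟩
  · rintro ⟨p, hp, h1, h2⟩
    exact ⟨p, PySem.List.mem_pyRange_one.mpr ⟨h1, by omega⟩, (PySem.Set.contains_iff S p).mpr hp⟩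
lemma killedB_len (S : PySem.Set Int) (d : PySem.Dict Int Int) (m : List (Int × Int))
    (hinv : ∀ p j : Int, d.get? p = some j ↔ RunHit m p j) :
    (killedB S d).length = m.countP (killP S) := by
  rw [killedB_eq_ofList]
  rw [← killIdx_length S m 0]
  apply List.Perm.length_eq
  rw [List.perm_ext_iff_of_nodup (PySem.Set.nodup_ofList _) (killIdx_nodup S m 0)]
  intro j
  rw [PySem.Set.mem_ofList, List.mem_filterMap, killIdx_mem]
  constructor
  · rintro ⟨p, hp, hd⟩
    rcases (hinv p j).mp hd with ⟨jn, hlt, hj, h1, h2⟩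
    exact ⟨jn, hlt, by omega, (killP_iff S _).mpr ⟨p, hp, h1, h2⟩⟩
  · rintro ⟨jn, hlt, hj, hk⟩
    rcases (killP_iff S _).mp hk with ⟨p, hp, h1, h2⟩
    exact ⟨p, hp, (hinv p j).mpr ⟨jn, hlt, by omega, h1, h2⟩⟩

lemma foldl_sub_if (P : Int × Int → Bool) (l : List (Int × Int)) (a : Int) :
    l.foldl (fun x p => if P p then x - 1 else x) a = a - (l.countP P : Int) := by
  induction l generalizing a with
  | nil => simp
  | cons p l ih =>
    rw [List.foldl_cons, ih, List.countP_cons]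
    by_cases h : P p = true <;> simp [h] <;> try ring

lemma foldl_sub_if' (S : PySem.Set Int) (l : List (Int × Int)) (a : Int) :
    l.foldl (fun x p =>
      if (PySem.List.pyRange p.1 (p.2 + 1) 1).any (fun i => PySem.Set.contains S i)
      then x - 1 else x) a = a - (l.countP (killP S) : Int) :=
  foldl_sub_if (killP S) l a

lemma labelB_spec (G : String) :
    ∃ d' : PySem.Dict Int Int,
      labelB G
        = (((PySem.List.enumerate ('X' :: G.toList ++ ['X']) 0).foldl solveStepA
              ('X', 0, PySem.Set.empty, ([] : List (Int × Int)))).2.2.1, d',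
           ((((PySem.List.enumerate ('X' :: G.toList ++ ['X']) 0).foldl solveStepA
              ('X', 0, PySem.Set.empty, ([] : List (Int × Int)))).2.2.2).length : Int))
      ∧ (∀ p j : Int, d'.get? p = some j ↔
           RunHit (((PySem.List.enumerate ('X' :: G.toList ++ ['X']) 0).foldl solveStepA
              ('X', 0, PySem.Set.empty, ([] : List (Int × Int)))).2.2.2) p j) := by
  have hcl : ('X' :: G.toList ++ ['X']) = [] ∨ ('X' :: G.toList ++ ['X']).getLast? = some 'X' := by
    right
    rw [show ('X' :: G.toList ++ ['X']) = ('X' :: G.toList) ++ ['X'] from rfl]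
    exact List.getLast?_concat
  have h := labelGo_spec ('X' :: G.toList ++ ['X']).length _ rfl 0 0 PySem.Set.empty
    ([] : List (Int × Int)) PySem.Dict.empty hcl (by simp)
    (by intro p j
        rw [PySem.Dict.get?_empty]
        constructor
        · intro h; exact absurd h (by simp)
        · rintro ⟨jn, hjl, _⟩; exact absurd hjl (by simp))
  simpa [labelB] using h

-- ===== VERDICT (by name: the statement is the Claim_ definition above) =====
theorem solve_spec : Claim_equal_solve := by
  intro N G1 G2 _
  unfold Spec_solve
  obtain ⟨d1, he1, hi1⟩ := labelB_spec G1
  obtain ⟨d2, he2, hi2⟩ := labelB_spec G2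
  simp only [solve, solve_alt, he1, he2, foldl_sub_if', PySem.Set.len]
  rw [killedB_len _ d1 _ hi1, killedB_len _ d2 _ hi2]
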